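-- pv_equiv track=rewrite | github.com/Kozak15/Math-stuff | Mathstuff.py | max_stopping_time
-- ===== SOURCE A (Python) =====
-- def stopping_time(n):
--     steps = 0
--     while n != 1:
--         if n % 2 == 0:
--             n = n // 2
--         else:
--             n = 3 * n + 1
--         steps += 1
--     return steps
--
-- def max_stopping_time(n):
--     max_steps = 0
--     new_n = 1
--     for x in range(1, n + 1):
--         steps = stopping_time(x)
--         if steps > max_steps:
--             max_steps=steps
--             new_n = x
--     return [new_n, max_steps]
-- ===== SOURCE B (Python) =====
-- def _stopping_time(x):
--     if x == 1:
--         return 0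
--     return 1 + _stopping_time(x // 2 if x % 2 == 0 else 3 * x + 1)
--
--
-- def max_stopping_time(n):
--     best = max(range(1, n + 1), key=_stopping_time, default=1)
--     return [best, _stopping_time(best)]
-- ===== Notes on version B (the rewrite author's own statement) =====
-- stated objective: simpler
-- what changed: B replaces A's manual running-max accumulator loop (and A's iterative step counter) with the idiomatic argmax `max(range(1, n+1), key=_stopping_time, default=1)` over a recursively defined stopping time, recomputing the stopping time once for the winner.
import Mathlib
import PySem

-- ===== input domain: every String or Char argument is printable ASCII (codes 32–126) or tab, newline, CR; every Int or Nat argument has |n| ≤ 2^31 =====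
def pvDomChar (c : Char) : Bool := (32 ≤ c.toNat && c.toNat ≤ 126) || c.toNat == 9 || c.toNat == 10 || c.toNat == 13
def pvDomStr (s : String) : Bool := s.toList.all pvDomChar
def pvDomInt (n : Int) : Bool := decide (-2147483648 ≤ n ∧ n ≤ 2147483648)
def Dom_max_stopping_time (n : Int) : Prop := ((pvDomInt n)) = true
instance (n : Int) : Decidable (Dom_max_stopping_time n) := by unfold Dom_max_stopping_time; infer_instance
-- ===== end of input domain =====

-- B replaces A's running-max accumulator loop and iterative step counter with the idiomatic
-- argmax `max(range(1, n+1), key=_stopping_time, default=1)` over a recursive stopping time.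
-- Both ports totalize the (mathematically unproven-terminating) Collatz walk with the same
-- step-counting fuel; the fuel guard is a totalization artifact only.

def pvFuel : Nat := 1000000000

-- ===== PORT A =====
-- while n != 1: n = n//2 if even else 3n+1; steps += 1   (fuel = one unit per loop iteration)
def stoppingLoopA : Nat → Int → Int → Int
  | 0, _, steps => steps
  | fuel+1, n, steps =>
    if n ≠ 1 then
      stoppingLoopA fuel
        (if PySem.Int.mod n 2 = 0 then PySem.Int.floordiv n 2 else 3 * n + 1) (steps + 1)
    else steps

def stopping_time (n : Int) : Int := stoppingLoopA pvFuel n 0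

def max_stopping_time (n : Int) : List Int :=
  let res := (PySem.List.pyRange 1 (n + 1) 1).foldl
    (fun (st : Int × Int) x =>
      let steps := stopping_time x
      if steps > st.1 then (steps, x) else st)
    ((0 : Int), (1 : Int))
  [res.2, res.1]

-- ===== PORT B =====
-- recursive stopping time (fuel = one unit per recursive call, same accounting as A's loop)
def stoppingRecB : Nat → Int → Int
  | 0, _ => 0
  | fuel+1, x =>
    if x = 1 then 0
    else 1 + stoppingRecB fuel
      (if PySem.Int.mod x 2 = 0 then PySem.Int.floordiv x 2 else 3 * x + 1)

def stopping_time_b (x : Int) : Int := stoppingRecB pvFuel x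

def max_stopping_time_alt (n : Int) : List Int :=
  let best := (PySem.List.max? (PySem.List.pyRange 1 (n + 1) 1) stopping_time_b).getD 1
  [best, stopping_time_b best]

-- ===== PRECONDITION & SPEC =====
def Spec_max_stopping_time (n : Int) (out : List Int) : Prop := out = max_stopping_time_alt n
instance (n : Int) (out : List Int) : Decidable (Spec_max_stopping_time n out) := by unfold Spec_max_stopping_time; infer_instance

-- ===== CLAIM (what is proved, stated in full; the proofs are below) =====
def Claim_equal_max_stopping_time : Prop := ∀ (n : Int), Dom_max_stopping_time n → Spec_max_stopping_time n (max_stopping_time n)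

-- ===== LEMMAS AND PROOFS =====

-- A's tail-recursive step counter equals B's recursive stopping time plus the accumulator.
theorem stoppingLoopA_eq_rec (f : Nat) : ∀ (n s : Int),
    stoppingLoopA f n s = s + stoppingRecB f n := by
  induction f with
  | zero => intro n s; simp [stoppingLoopA, stoppingRecB]
  | succ f ih =>
    intro n s
    by_cases h : n = 1
    · simp [stoppingLoopA, stoppingRecB, h]
    · simp only [stoppingLoopA, stoppingRecB, h, if_neg, ne_eq, not_false_iff, if_true]
      rw [ih]
      ring

theorem stopping_time_eq (x : Int) : stopping_time x = stopping_time_b x := by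
  unfold stopping_time stopping_time_b
  rw [stoppingLoopA_eq_rec]
  ring

theorem stopping_time_b_one : stopping_time_b 1 = 0 := by
  unfold stopping_time_b pvFuel
  have h : (1000000000 : Nat) = 999999999 + 1 := rfl
  rw [h]
  simp [stoppingRecB]

-- running first-argmax picker
def pickMax (key : Int → Int) (c : Int) (l : List Int) : Int :=
  l.foldl (fun a x => if key a < key x then x else a) c

theorem max?_cons_eq_pickMax (key : Int → Int) : ∀ (l : List Int) (c : Int),
    PySem.List.max? (c :: l) key = some (pickMax key c l) := by
  intro l
  induction l with
  | nil => intro c; simp [PySem.List.max?, pickMax]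
  | cons x t ih =>
    intro c
    have h1 : PySem.List.max? (c :: x :: t) key
        = PySem.List.max? ((if key c < key x then x else c) :: t) key := by
      simp only [PySem.List.max?, List.foldl]
      split_ifs <;> rfl
    rw [h1, ih]
    simp only [pickMax, List.foldl]

-- A's accumulator fold, started at (key c, c), computes (key (pickMax key c l), pickMax key c l)
theorem foldA_eq_pickMax (key : Int → Int) : ∀ (l : List Int) (c : Int),
    l.foldl (fun (st : Int × Int) x =>
        let steps := key x
        if steps > st.1 then (steps, x) else st) (key c, c)
      = (key (pickMax key c l), pickMax key c l) := by
  intro l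
  induction l with
  | nil => intro c; simp [pickMax]
  | cons x t ih =>
    intro c
    simp only [List.foldl, pickMax]
    by_cases h : key c < key x
    · simp only [gt_iff_lt, h, if_pos]
      exact ih x
    · simp only [gt_iff_lt, h, if_neg, not_false_iff]
      exact ih c

theorem pyRange_empty_of_le {a b : Int} (h : b ≤ a) : PySem.List.pyRange a b 1 = [] := by
  simp only [PySem.List.pyRange]
  norm_num
  intro h'
  omega

-- ===== VERDICT (by name: the statement is the Claim_ definition above) =====
theorem max_stopping_time_spec : Claim_equal_max_stopping_time := by
  intro n _
  unfold Spec_max_stopping_time max_stopping_time max_stopping_time_alt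
  by_cases hn : n + 1 ≤ 1
  · rw [pyRange_empty_of_le hn]
    simp [PySem.List.max?, stopping_time_b_one]
  · have hlt : (1 : Int) < n + 1 := by omega
    rw [PySem.List.pyRange_one_cons hlt]
    simp only [stopping_time_eq, List.foldl]
    have h0 : (let steps := stopping_time_b 1
         if steps > (0 : Int) then (steps, (1 : Int)) else ((0 : Int), (1 : Int)))
        = ((stopping_time_b 1, (1 : Int)) : Int × Int) := by
      simp [stopping_time_b_one]
    rw [h0, foldA_eq_pickMax stopping_time_b (PySem.List.pyRange (1 + 1) (n + 1) 1) 1,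
        max?_cons_eq_pickMax]
    simp
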